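-- pv_equiv track=rewrite | github.com/AlikS02/Test | task1/task1.py | circular_array_path
-- ===== SOURCE A (Python) =====
-- def circular_array_path(n, m):
--     """
--     Вычисляет путь по круговому массиву.
--
--     Параметры:
--     n (int): Длина кругового массива.
--     m (int): Длина шага.
--
--     Возвращает:
--     list: Путь, состоящий из начальных элементов интервалов.
--     """
--     if n <= 0 or m <= 0:
--         raise ValueError("Длина массива и шаг должны быть больше 0")
--
--     path = []  # Путь, который мы будем заполнять
--     index = 1  # Начинаем с элемента с индексом 1
--
--     while True:
--         interval_end = (index + m - 1) % n
--         interval_end = n if interval_end == 0 else interval_end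
--         path.append(index)
--
--         if interval_end == 1:
--             break
--
--         index = interval_end % n
--         index = n if index == 0 else index
--
--     return path
-- ===== SOURCE B (Python) =====
-- def circular_array_path(n, m):
--     """Closed-form: orbit of 1 under +(m-1) mod n has length n // gcd(n, m-1)."""
--     if n <= 0 or m <= 0:
--         raise ValueError("Длина массива и шаг должны быть больше 0")
--     a, b = n, (m - 1) % n
--     while b:
--         a, b = b, a % b
--     return [(k * (m - 1)) % n + 1 for k in range(n // a)]
-- ===== Notes on version B (the rewrite author's own statement) =====
-- stated objective: simpler
-- what changed: Replaces the step-by-step circular walk (per-iteration modular normalisation and an explicit break test) by a closed form: the orbit length is n // gcd(n, m-1) (Euclid), and the path is the arithmetic progression [(k*(m-1)) % n + 1 for k in range(L)] built directly.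
import Mathlib
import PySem

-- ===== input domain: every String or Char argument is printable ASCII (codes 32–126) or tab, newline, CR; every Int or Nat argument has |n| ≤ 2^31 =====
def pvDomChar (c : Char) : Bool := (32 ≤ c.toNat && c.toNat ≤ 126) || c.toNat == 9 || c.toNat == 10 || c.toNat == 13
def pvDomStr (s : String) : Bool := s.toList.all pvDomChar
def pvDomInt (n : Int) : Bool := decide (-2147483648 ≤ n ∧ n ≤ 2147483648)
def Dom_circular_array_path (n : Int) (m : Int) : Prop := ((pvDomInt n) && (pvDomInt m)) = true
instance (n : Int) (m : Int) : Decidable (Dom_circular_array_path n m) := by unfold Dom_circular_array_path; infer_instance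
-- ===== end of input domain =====

-- B replaces A's step-by-step circular walk by a closed form: orbit length n // gcd(n, m-1)
-- (Euclid) and the arithmetic progression of visited indices (objective: simpler).
-- Equivalence of return values on Pre_ (n ≥ 1 and m ≥ 1; A raises ValueError otherwise).

-- ===== PORT A =====
-- the while-True loop; the fuel argument only makes it total (under Pre_ the loop
-- breaks after n // gcd(n, m-1) ≤ n iterations, so fuel n.toNat is never exhausted)
def pvLoopA (n : Int) (m : Int) : Nat → Int → List Int → List Int
  | 0, _, path => path
  | fuel + 1, index, path =>
    let ie0 := PySem.Int.mod (index + m - 1) n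
    let ie := if ie0 = 0 then n else ie0
    let path' := path ++ [index]
    if ie = 1 then path'
    else
      let i0 := PySem.Int.mod ie n
      pvLoopA n m fuel (if i0 = 0 then n else i0) path'

def circular_array_path (n : Int) (m : Int) : List Int :=
  if n ≤ 0 ∨ m ≤ 0 then []   -- Python raises ValueError here; excluded by Pre_
  else pvLoopA n m n.toNat 1 []

-- ===== PORT B =====
-- helper for pvEuclid's termination (the loop itself is the transliteration of Source B)
theorem pv_mod_natAbs_lt (a b : Int) (hb : b ≠ 0) :
    (PySem.Int.mod a b).natAbs < b.natAbs := by
  rcases lt_trichotomy b 0 with h | h | h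
  · have := PySem.Int.mod_neg_bounds a h
    omega
  · exact absurd h hb
  · have h1 := PySem.Int.mod_nonneg a h
    have h2 := PySem.Int.mod_lt a h
    omega

-- the hand-written Euclid loop of Source B: while b: a, b = b, a % b
def pvEuclid (a b : Int) : Int :=
  if h : b = 0 then a else pvEuclid b (PySem.Int.mod a b)
termination_by b.natAbs
decreasing_by exact pv_mod_natAbs_lt a b h

def circular_array_path_alt (n : Int) (m : Int) : List Int :=
  if n ≤ 0 ∨ m ≤ 0 then []   -- Python raises ValueError here; excluded by Pre_
  else
    (PySem.List.pyRange 0 (PySem.Int.floordiv n (pvEuclid n (PySem.Int.mod (m - 1) n))) 1).map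
      (fun k => PySem.Int.mod (k * (m - 1)) n + 1)

-- ===== PRECONDITION & SPEC =====
-- Pre_: exactly where A returns (A raises ValueError when n <= 0 or m <= 0)
def Pre_circular_array_path (n : Int) (m : Int) : Prop := 0 < n ∧ 0 < m
instance (n : Int) (m : Int) : Decidable (Pre_circular_array_path n m) := by
  unfold Pre_circular_array_path; infer_instance

def pvWitness_circular_array_path : Int × Int := (6, 3)

def Spec_circular_array_path (n : Int) (m : Int) (out : List Int) : Prop :=
  out = circular_array_path_alt n m
instance (n : Int) (m : Int) (out : List Int) : Decidable (Spec_circular_array_path n m out) := by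
  unfold Spec_circular_array_path; infer_instance

-- ===== CLAIM (what is proved, stated in full; the proofs are below) =====
def Claim_equal_circular_array_path : Prop :=
  ∀ (n : Int) (m : Int), Dom_circular_array_path n m → Pre_circular_array_path n m →
    Spec_circular_array_path n m (circular_array_path n m)

-- ===== LEMMAS AND PROOFS =====

-- cast of an exact Nat division
theorem pv_cast_div (N G : Nat) (hG : 0 < G) (h : G ∣ N) :
    ((N / G : Nat) : Int) = (N : Int) / (G : Int) := by
  obtain ⟨c, rfl⟩ := h
  rw [Nat.mul_div_cancel_left c hG]
  push_cast
  rw [Int.mul_ediv_cancel_left c (by exact_mod_cast hG.ne')]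

-- divisibility characterisation: N ∣ j*D ↔ (N / gcd N D) ∣ j
theorem pv_dvd_iff (N D j : Nat) (hN : 0 < N) :
    N ∣ j * D ↔ N / Nat.gcd N D ∣ j := by
  set g := Nat.gcd N D with hg
  have hgpos : 0 < g := Nat.gcd_pos_of_pos_left D hN
  have hgN : g ∣ N := Nat.gcd_dvd_left N D
  have hgD : g ∣ D := Nat.gcd_dvd_right N D
  constructor
  · rintro ⟨c, hc⟩
    have hdiv : N / g ∣ j * (D / g) := by
      refine ⟨c, ?_⟩
      have h5 : j * (D / g) * g = N / g * c * g := by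
        rw [Nat.mul_assoc, Nat.div_mul_cancel hgD, Nat.mul_right_comm,
            Nat.div_mul_cancel hgN, hc]
      exact Nat.eq_of_mul_eq_mul_right hgpos h5
    exact (Nat.coprime_div_gcd_div_gcd hgpos).dvd_of_dvd_mul_right hdiv
  · rintro ⟨c, hc⟩
    refine ⟨c * (D / g), ?_⟩
    calc j * D = (N / g * c) * (D / g * g) := by rw [← hc, Nat.div_mul_cancel hgD]
    _ = (N / g * g) * (c * (D / g)) := by ring
    _ = N * (c * (D / g)) := by rw [Nat.div_mul_cancel hgN]

-- one Euclidean step of the gcd, for nonnegative first argument and positive second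
theorem pv_gcd_step (a b : Int) (ha : 0 ≤ a) (hb : 0 < b) : Int.gcd b (a % b) = Int.gcd a b := by
  unfold Int.gcd
  rw [Nat.gcd_comm]
  have h3 : (a % b).natAbs = a.natAbs % b.natAbs := by
    have h2 : a % b = (a.natAbs : Int) % (b.natAbs : Int) := by
      rw [Int.natAbs_of_nonneg ha, Int.natAbs_of_nonneg hb.le]
    rw [h2, ← Int.natCast_emod, Int.natAbs_natCast]
  rw [h3, ← Nat.gcd_rec, Nat.gcd_comm]

-- Source B's Euclid loop computes the gcd (for nonnegative arguments)
theorem pvEuclid_eq_gcd (a b : Int) (ha : 0 ≤ a) (hb : 0 ≤ b) :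
    pvEuclid a b = (Int.gcd a b : Int) := by
  rw [pvEuclid]
  split
  · rename_i h
    subst h
    simp [Int.gcd, Int.natAbs_of_nonneg ha]
  · rename_i h
    have hbpos : 0 < b := lt_of_le_of_ne hb (Ne.symm h)
    rw [PySem.Int.mod_eq_emod_of_pos hbpos]
    rw [pvEuclid_eq_gcd b (a % b) hb (Int.emod_nonneg a hbpos.ne')]
    rw [pv_gcd_step a b ha hbpos]
termination_by b.natAbs
decreasing_by
  have h1 := Int.emod_nonneg a hbpos.ne'
  have h2 := Int.emod_lt_of_pos a hbpos
  omega

-- the k-th visited index of the walk, in closed form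
def pvV (n : Int) (d : Int) (k : Nat) : Int := (k : Int) * d % n + 1

theorem pvV_bounds (n d : Int) (hn : 0 < n) (k : Nat) :
    1 ≤ pvV n d k ∧ pvV n d k ≤ n := by
  unfold pvV
  have h1 := Int.emod_nonneg ((k : Int) * d) hn.ne'
  have h2 := Int.emod_lt_of_pos ((k : Int) * d) hn
  omega

-- the interval_end computed by A's loop body at index pvV k is pvV (k+1)
theorem pv_ie_eq (n m : Int) (hn : 0 < n) (hm : 0 < m) (k : Nat) :
    (if PySem.Int.mod (pvV n (m - 1) k + m - 1) n = 0 then n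
     else PySem.Int.mod (pvV n (m - 1) k + m - 1) n) = pvV n (m - 1) (k + 1) := by
  have hw1 : 0 ≤ ((k + 1 : Nat) : Int) * (m - 1) % n := Int.emod_nonneg _ hn.ne'
  have hw2 : ((k + 1 : Nat) : Int) * (m - 1) % n < n := Int.emod_lt_of_pos _ hn
  have hmod : PySem.Int.mod (pvV n (m - 1) k + m - 1) n
      = (((k + 1 : Nat) : Int) * (m - 1) % n + 1) % n := by
    rw [PySem.Int.mod_eq_emod_of_pos hn]
    have he : pvV n (m - 1) k + m - 1 = (k : Int) * (m - 1) % n + (m - 1) + 1 := by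
      unfold pvV; ring
    rw [he]
    calc ((k : Int) * (m - 1) % n + (m - 1) + 1) % n
        = ((k : Int) * (m - 1) % n + ((m - 1) + 1)) % n := by ring_nf
      _ = ((k : Int) * (m - 1) + ((m - 1) + 1)) % n := by rw [Int.emod_add_emod]
      _ = (((k + 1 : Nat) : Int) * (m - 1) + 1) % n := by push_cast; ring_nf
      _ = ((((k + 1 : Nat) : Int) * (m - 1)) % n + 1) % n := by rw [Int.emod_add_emod]
  rw [hmod]
  unfold pvV
  by_cases hcase : ((k + 1 : Nat) : Int) * (m - 1) % n + 1 = n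
  · rw [hcase, Int.emod_self, if_pos rfl]
  · rw [Int.emod_eq_of_lt (by omega) (by omega), if_neg (by omega)]

-- A's normalisation 'index = ie % n; n if 0' is the identity on 1..n
theorem pv_idx_eq (n x : Int) (hn : 0 < n) (h1 : 1 ≤ x) (h2 : x ≤ n) :
    (if PySem.Int.mod x n = 0 then n else PySem.Int.mod x n) = x := by
  rw [PySem.Int.mod_eq_emod_of_pos hn]
  by_cases hx : x = n
  · subst hx; rw [Int.emod_self, if_pos rfl]
  · rw [Int.emod_eq_of_lt (by omega) (by omega), if_neg (by omega)]

-- the loop invariant: starting at pvV k with r+1 appends left before the break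
theorem pvLoopA_spec (n m : Int) (hn : 0 < n) (hm : 0 < m) :
    ∀ (r k fuel : Nat) (acc : List Int),
      k + r + 1 = n.toNat / Nat.gcd n.toNat (m - 1).toNat →
      r + 1 ≤ fuel →
      pvLoopA n m fuel (pvV n (m - 1) k) acc
        = acc ++ (List.range (r + 1)).map (fun i => pvV n (m - 1) (k + i)) := by
  have hd : 0 ≤ m - 1 := by omega
  have hNd : n = ((n.toNat : Nat) : Int) := (Int.toNat_of_nonneg hn.le).symm
  have hDd : m - 1 = (((m - 1).toNat : Nat) : Int) := (Int.toNat_of_nonneg hd).symm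
  have hdvd : ∀ j : Nat, ((j : Int) * (m - 1) % n = 0)
      ↔ (n.toNat / Nat.gcd n.toNat (m - 1).toNat ∣ j) := by
    intro j
    rw [PySem.Int.emod_eq_zero_iff_dvd]
    rw [← pv_dvd_iff n.toNat (m - 1).toNat j (by omega)]
    constructor
    · intro h
      have : ((n.toNat : Nat) : Int) ∣ ((j * (m - 1).toNat : Nat) : Int) := by
        push_cast
        rw [← hNd, ← hDd]
        exact h
      exact_mod_cast this
    · intro h
      have : ((n.toNat : Nat) : Int) ∣ ((j * (m - 1).toNat : Nat) : Int) := by exact_mod_cast h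
      rw [← hNd] at this
      push_cast at this
      rw [← hDd] at this
      exact this
  intro r
  induction r with
  | zero =>
    intro k fuel acc hk hfuel
    obtain ⟨f, rfl⟩ : ∃ f, fuel = f + 1 := ⟨fuel - 1, by omega⟩
    simp only [pvLoopA]
    rw [pv_ie_eq n m hn hm k]
    have hbrk : pvV n (m - 1) (k + 1) = 1 := by
      have : ((k + 1 : Nat) : Int) * (m - 1) % n = 0 := (hdvd (k + 1)).mpr ⟨1, by omega⟩
      unfold pvV
      omega
    rw [if_pos hbrk]
    simp
  | succ r ih =>
    intro k fuel acc hk hfuel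
    obtain ⟨f, rfl⟩ : ∃ f, fuel = f + 1 := ⟨fuel - 1, by omega⟩
    simp only [pvLoopA]
    rw [pv_ie_eq n m hn hm k]
    have hnbrk : pvV n (m - 1) (k + 1) ≠ 1 := by
      intro hcon
      have h0 : ((k + 1 : Nat) : Int) * (m - 1) % n = 0 := by
        unfold pvV at hcon
        omega
      have hdl := Nat.le_of_dvd (Nat.succ_pos k) ((hdvd (k + 1)).mp h0)
      omega
    rw [if_neg hnbrk]
    obtain ⟨hb1, hb2⟩ := pvV_bounds n (m - 1) hn (k + 1)
    rw [pv_idx_eq n (pvV n (m - 1) (k + 1)) hn hb1 hb2]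
    rw [ih (k + 1) f (acc ++ [pvV n (m - 1) k]) (by omega) (by omega)]
    rw [List.append_assoc]
    congr 1
    conv_rhs => rw [List.range_succ_eq_map]
    rw [List.map_cons, List.map_map, List.singleton_append]
    simp only [Nat.add_zero]
    congr 1
    apply List.map_congr_left
    intro i _
    simp only [Function.comp_apply]
    congr 1
    omega

-- ===== VERDICT (by name: the statement is the Claim_ definition above) =====
theorem circular_array_path_spec : Claim_equal_circular_array_path := by
  intro n m _ hpre
  obtain ⟨hn, hm⟩ := hpre
  unfold Spec_circular_array_path circular_array_path circular_array_path_alt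
  rw [if_neg (by omega), if_neg (by omega)]
  have hd : 0 ≤ m - 1 := by omega
  have hmodnn : 0 ≤ PySem.Int.mod (m - 1) n := PySem.Int.mod_nonneg (m - 1) hn
  have hGN : Int.gcd n (m - 1) = Nat.gcd n.toNat (m - 1).toNat := by
    unfold Int.gcd
    congr 1 <;> omega
  have hGpos : 0 < Nat.gcd n.toNat (m - 1).toNat := Nat.gcd_pos_of_pos_left _ (by omega)
  have hGdvd : Nat.gcd n.toNat (m - 1).toNat ∣ n.toNat := Nat.gcd_dvd_left _ _
  have hg : pvEuclid n (PySem.Int.mod (m - 1) n)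
      = ((Nat.gcd n.toNat (m - 1).toNat : Nat) : Int) := by
    rw [pvEuclid_eq_gcd n _ hn.le hmodnn, PySem.Int.mod_eq_emod_of_pos hn,
        pv_gcd_step (m - 1) n hd hn, Int.gcd_comm, hGN]
  have hL : PySem.Int.floordiv n (pvEuclid n (PySem.Int.mod (m - 1) n))
      = ((n.toNat / Nat.gcd n.toNat (m - 1).toNat : Nat) : Int) := by
    rw [hg, PySem.Int.floordiv_eq_ediv_of_pos (by exact_mod_cast hGpos),
        pv_cast_div n.toNat _ hGpos hGdvd]
    congr 1
    omega
  rw [hL, PySem.List.pyRange_one]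
  have hcast : ∀ x : Nat, ((x : Int) - 0).toNat = x := by
    intro x
    omega
  rw [hcast]
  have hLpos : 1 ≤ n.toNat / Nat.gcd n.toNat (m - 1).toNat := by
    rw [Nat.le_div_iff_mul_le hGpos]
    simpa using Nat.le_of_dvd (by omega) hGdvd
  have hfuel : n.toNat / Nat.gcd n.toNat (m - 1).toNat ≤ n.toNat := Nat.div_le_self _ _
  have hone : (1 : Int) = pvV n (m - 1) 0 := by
    unfold pvV
    simp
  conv_lhs => rw [hone]
  rw [pvLoopA_spec n m hn hm (n.toNat / Nat.gcd n.toNat (m - 1).toNat - 1) 0 n.toNat []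
        (by omega) (by omega)]
  have hr1 : n.toNat / Nat.gcd n.toNat (m - 1).toNat - 1 + 1
      = n.toNat / Nat.gcd n.toNat (m - 1).toNat := by omega
  rw [hr1, List.nil_append]
  simp only [List.map_map]
  apply List.map_congr_left
  intro i _
  simp only [Function.comp_apply]
  unfold pvV
  rw [PySem.Int.mod_eq_emod_of_pos hn]
  norm_num
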